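-- pv_equiv track=rewrite | github.com/moriwell/Integrated-Circuit | test.py | make_parm
-- ===== SOURCE A (Python) =====
-- def listExcludedIndices(data, indices=[]):
--   return [x for i, x in enumerate(data) if i not in indices]
--
-- def make_parm(data,flip=False):
--     result = []
--     for i in range(len(data)):
--       for j in range(len(data) - 1):
--         for k in range(len(data) - 2):
--             for l in range(len(data) - 3):
--                 jData = listExcludedIndices(data, [i])
--                 kData = listExcludedIndices(jData, [j])
--                 lData = listExcludedIndices(kData, [k])
--                 result.append([data[i], jData[j], kData[k],lData[l]])
--
--     return result
-- ===== SOURCE B (Python) =====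
-- def make_parm(data, flip=False):
--     def picks(xs):
--         if not xs:
--             return []
--         head, tail = xs[0], xs[1:]
--         return [(head, tail)] + [(y, [head] + rest) for y, rest in picks(tail)]
--     return [[a, b, c, d]
--             for a, r1 in picks(data)
--             for b, r2 in picks(r1)
--             for c, r3 in picks(r2)
--             for d in r3]
-- ===== Notes on version B (the rewrite author's own statement) =====
-- stated objective: faster
-- what changed: Replaces the four index loops that rebuild every excluded-index list from scratch inside the innermost loop by a recursive picks helper that pairs each element with the list without it, computed once per nesting level; intended as faster (O(n^4) vs O(n^5)); a timing run measured 12.4x at n=16, the largest size both finished (at n=64 neither finishes: the output itself has Theta(n^4) rows).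
import Mathlib
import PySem

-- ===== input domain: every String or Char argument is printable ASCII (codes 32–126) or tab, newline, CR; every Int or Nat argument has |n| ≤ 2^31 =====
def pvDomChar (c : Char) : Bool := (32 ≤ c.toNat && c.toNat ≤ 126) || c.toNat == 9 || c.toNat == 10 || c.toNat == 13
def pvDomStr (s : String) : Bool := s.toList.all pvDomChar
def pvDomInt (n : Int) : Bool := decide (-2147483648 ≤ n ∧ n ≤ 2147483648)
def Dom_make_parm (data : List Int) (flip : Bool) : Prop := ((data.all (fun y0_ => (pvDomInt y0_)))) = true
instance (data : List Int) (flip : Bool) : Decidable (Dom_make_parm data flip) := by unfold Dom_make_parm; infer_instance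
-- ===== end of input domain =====

-- B replaces A's four index loops (which rebuild every excluded-index list inside the innermost
-- loop) by a recursive picks helper computed once per nesting level: intended as faster
-- (O(n^4) vs O(n^5)); a timing run measured 12.4x at n=16, the largest size both finished.

-- ===== PORT A =====
def listExcludedIndices (data : List Int) (indices : List Int) : List Int :=
  (PySem.List.enumerate data 0).filterMap (fun p => if p.1 ∈ indices then none else some p.2)

def make_parm (data : List Int) (flip : Bool) : List (List Int) :=
  (PySem.List.pyRange 0 (data.length : Int) 1).foldl (fun result i =>
    (PySem.List.pyRange 0 ((data.length : Int) - 1) 1).foldl (fun result j =>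
      (PySem.List.pyRange 0 ((data.length : Int) - 2) 1).foldl (fun result k =>
        (PySem.List.pyRange 0 ((data.length : Int) - 3) 1).foldl (fun result l =>
          let jData := listExcludedIndices data [i]
          let kData := listExcludedIndices jData [j]
          let lData := listExcludedIndices kData [k]
          result ++ [[PySem.List.pyGetD data i 0, PySem.List.pyGetD jData j 0,
                      PySem.List.pyGetD kData k 0, PySem.List.pyGetD lData l 0]])
          result) result) result) []

-- ===== PORT B =====
def pvPicks (xs : List Int) : List (Int × List Int) :=
  match xs with
  | [] => []
  | head :: tail => [(head, tail)] ++ (pvPicks tail).map (fun p => (p.1, [head] ++ p.2))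

def make_parm_alt (data : List Int) (flip : Bool) : List (List Int) :=
  (pvPicks data).flatMap (fun p1 =>
    (pvPicks p1.2).flatMap (fun p2 =>
      (pvPicks p2.2).flatMap (fun p3 =>
        p3.2.map (fun d => [p1.1, p2.1, p3.1, d]))))

-- ===== PRECONDITION & SPEC =====
def Spec_make_parm (data : List Int) (flip : Bool) (out : List (List Int)) : Prop := out = make_parm_alt data flip
instance (data : List Int) (flip : Bool) (out : List (List Int)) : Decidable (Spec_make_parm data flip out) := by unfold Spec_make_parm; infer_instance

-- ===== CLAIM (what is proved, stated in full; the proofs are below) =====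
def Claim_equal_make_parm : Prop := ∀ (data : List Int) (flip : Bool), Dom_make_parm data flip → Spec_make_parm data flip (make_parm data flip)

-- ===== LEMMAS AND PROOFS =====

-- filtering an enumeration on an index below the start keeps every element
theorem pvEnum_keep (t : List Int) (s c : Int) (h : c < s) :
    (PySem.List.enumerate t s).filterMap (fun p => if p.1 = c then none else some p.2) = t := by
  induction t generalizing s with
  | nil => simp [PySem.List.enumerate_nil]
  | cons x tt ih =>
    rw [PySem.List.enumerate_cons, List.filterMap_cons]
    simp only [if_neg (by omega : ¬ (s = c))]
    rw [ih (s+1) (by omega)]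

-- dropping exactly one enumeration index is List.eraseIdx
theorem pvFilterEnum_eraseIdx (xs : List Int) (s : Int) (k : Nat) :
    (PySem.List.enumerate xs s).filterMap
      (fun p => if p.1 = s + (k : Int) then none else some p.2) = xs.eraseIdx k := by
  induction xs generalizing s k with
  | nil => simp [PySem.List.enumerate_nil]
  | cons x t ih =>
    cases k with
    | zero =>
      rw [PySem.List.enumerate_cons, List.filterMap_cons]
      simp only [Nat.cast_zero, add_zero]
      rw [pvEnum_keep t (s+1) s (by omega), List.eraseIdx_cons_zero]
      simp
    | succ m =>
      rw [PySem.List.enumerate_cons, List.filterMap_cons]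
      simp only [if_neg (show ¬ (s = s + ((m+1 : Nat) : Int)) by push_cast; omega)]
      have e : s + ((m+1 : Nat) : Int) = (s+1) + (m : Int) := by push_cast; ring
      rw [e, ih (s+1) m, List.eraseIdx_cons_succ]

theorem pvListExcluded_eraseIdx (xs : List Int) (k : Nat) :
    listExcludedIndices xs [(k : Int)] = xs.eraseIdx k := by
  have h := pvFilterEnum_eraseIdx xs 0 k
  simp only [zero_add] at h
  simpa [listExcludedIndices] using h

-- pvPicks pairs the element at each index with the list without it
theorem pvPicks_eq (xs : List Int) :
    pvPicks xs = (List.range xs.length).map (fun i => (xs.getD i 0, xs.eraseIdx i)) := by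
  induction xs with
  | nil => simp [pvPicks]
  | cons x t ih =>
    simp only [pvPicks, ih, List.length_cons, List.range_succ_eq_map, List.map_cons,
      List.map_map, List.singleton_append, List.getD_cons_zero, List.eraseIdx_cons_zero]
    refine congrArg _ (List.map_congr_left ?_)
    intro i _
    simp [Function.comp]

-- Python's range over an Int difference of Nat lengths is a Nat range (empty when negative)
theorem pvRange_sub (n m : Nat) :
    PySem.List.pyRange 0 ((n : Int) - (m : Int)) 1 = (List.range (n - m)).map (fun k : Nat => (k : Int)) := by
  by_cases h : m ≤ n
  · have e : (n : Int) - (m : Int) = ((n - m : Nat) : Int) := by omega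
    rw [e, PySem.List.pyRange_zero_natCast]
  · have h1 : PySem.List.pyRange 0 ((n : Int) - (m : Int)) 1 = [] :=
      PySem.List.pyRange_one_eq_nil (by omega)
    have h2 : n - m = 0 := by omega
    simp [h1, h2]

-- a map over all indices of a list is a map over its elements
theorem pvMap_eq_range_map {β : Type} (xs : List Int) (f : Int → β) :
    (List.range xs.length).map (fun i => f (xs.getD i 0)) = xs.map f := by
  apply List.ext_getElem
  · simp
  · intro i h1 h2
    have hi : i < xs.length := by simpa using h2
    simp [List.getD_eq_getElem?_getD, List.getElem?_eq_getElem hi]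

theorem pv_main (data : List Int) (flip : Bool) : make_parm data flip = make_parm_alt data flip := by
  have r1 : PySem.List.pyRange 0 ((data.length : Int) - 1) 1 = (List.range (data.length - 1)).map (fun k : Nat => (k:Int)) := by
    simpa using pvRange_sub data.length 1
  have r2 : PySem.List.pyRange 0 ((data.length : Int) - 2) 1 = (List.range (data.length - 2)).map (fun k : Nat => (k:Int)) := by
    simpa using pvRange_sub data.length 2
  have r3 : PySem.List.pyRange 0 ((data.length : Int) - 3) 1 = (List.range (data.length - 3)).map (fun k : Nat => (k:Int)) := by
    simpa using pvRange_sub data.length 3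
  simp only [make_parm, make_parm_alt, r1, r2, r3, PySem.List.pyRange_zero_natCast,
    PySem.List.foldl_append_singleton_eq_map, PySem.List.foldl_append_eq_flatMap,
    List.nil_append, List.flatMap_map, List.map_map, pvPicks_eq, pvListExcluded_eraseIdx,
    PySem.List.pyGetD_natCast]
  apply List.flatMap_congr
  intro i hi
  have hi' : i < data.length := List.mem_range.mp hi
  have h1 : (data.eraseIdx i).length = data.length - 1 := List.length_eraseIdx_of_lt hi'
  rw [h1]
  apply List.flatMap_congr
  intro j hj
  have hj' : j < data.length - 1 := List.mem_range.mp hj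
  have h2 : ((data.eraseIdx i).eraseIdx j).length = data.length - 2 := by
    rw [List.length_eraseIdx_of_lt (h1 ▸ hj'), h1]; omega
  rw [h2]
  apply List.flatMap_congr
  intro k hk
  have hk' : k < data.length - 2 := List.mem_range.mp hk
  have h3 : (((data.eraseIdx i).eraseIdx j).eraseIdx k).length = data.length - 3 := by
    rw [List.length_eraseIdx_of_lt (h2 ▸ hk'), h2]; omega
  simp only [Function.comp_def, PySem.List.pyGetD_natCast]
  rw [← h3]
  exact pvMap_eq_range_map (((data.eraseIdx i).eraseIdx j).eraseIdx k)
    (fun d => [data.getD i 0, (data.eraseIdx i).getD j 0, ((data.eraseIdx i).eraseIdx j).getD k 0, d])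

-- ===== VERDICT (by name: the statement is the Claim_ definition above) =====
theorem make_parm_spec : Claim_equal_make_parm := by
  intro data flip _
  unfold Spec_make_parm
  exact pv_main data flip
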